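-- pv_equiv track=rewrite | github.com/shivg7706/CodeJam | gcj1.py | swap_required
-- ===== SOURCE A (Python) =====
-- def curdam(s):
-- 	charge = 1
-- 	damage = 0
-- 	for i in s:
-- 		if i == 'C':
-- 			charge *= 2
-- 		else:
-- 			damage += charge
-- 	return damage
--
-- def swap_required(s, d):
-- 	swap_c = 0
-- 	while True:
-- 		current_damage = curdam(s)
-- 		if current_damage <= d:
-- 			return swap_c
-- 		else:
-- 			pos = -1
-- 			for i in range(len(s)-1):
-- 				if s[i] == 'C' and s[i+1] == 'S':
-- 					pos = i
-- 			if pos == -1: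
-- 				return pos
-- 		s[pos], s[pos+1] = s[pos+1], s[pos]
-- 		swap_c += 1
-- ===== SOURCE B (Python) =====
-- # B: analytic one-pass + sorted reduction list instead of A's repeated full simulation.
-- # (A mutates s in place; B does not -- equivalence is about the return value.)
-- def swap_required(s, d):
--     damage = 0
--     c = 0        # number of 'C' seen so far
--     base = 0     # 'C'-count at the start of the current segment (after last blocker)
--     exps = []    # one entry per possible swap: exponent of its damage reduction
--     for ch in s:
--         if ch == 'C':
--             c += 1
--         else:
--             damage += 2 ** c
--             if ch == 'S':
--                 exps.extend(range(base, c))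
--             else:
--                 base = c   # a non-'C', non-'S' element blocks 'S' movement
--     exps.sort(reverse=True)
--     swaps = 0
--     for e in exps:
--         if damage <= d:
--             return swaps
--         damage -= 2 ** e
--         swaps += 1
--     return swaps if damage <= d else -1
-- ===== Notes on version B (the rewrite author's own statement) =====
-- stated objective: alternative
-- what changed: Instead of repeatedly re-simulating the damage and rescanning for the rightmost 'CS' pair once per swap, B computes in one pass the initial damage and the list of per-swap damage reductions (one power of two per 'C' an 'S' can still cross), sorts it descending and subtracts until the damage bound is met.
import Mathlib
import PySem

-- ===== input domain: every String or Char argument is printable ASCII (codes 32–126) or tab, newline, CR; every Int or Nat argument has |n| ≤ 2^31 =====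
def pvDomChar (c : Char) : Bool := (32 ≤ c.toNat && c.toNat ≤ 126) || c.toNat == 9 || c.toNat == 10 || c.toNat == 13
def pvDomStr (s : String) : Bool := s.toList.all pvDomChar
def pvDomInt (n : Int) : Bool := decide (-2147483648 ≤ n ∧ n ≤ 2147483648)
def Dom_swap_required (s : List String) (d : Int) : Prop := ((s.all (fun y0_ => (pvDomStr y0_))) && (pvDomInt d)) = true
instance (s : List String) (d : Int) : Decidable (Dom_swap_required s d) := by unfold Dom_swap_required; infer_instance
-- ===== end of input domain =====

-- B replaces A's per-swap re-simulation and rescanning by one pass that collects the damage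
-- and the exponents of all per-swap damage reductions, sorted descending and subtracted in turn.
-- A mutates its list argument in place; B does not — the equivalence is about the return value.

-- ===== PORT A =====
-- s[i] for an index A only uses in range (0 ≤ i < len(s)); exact there.
def pvGetS (s : List String) (i : Int) : String := (PySem.List.pyGet? s i).getD ""

def pvDstep (p : Int × Int) (i : String) : Int × Int :=
  if i = "C" then (p.1 * 2, p.2) else (p.1, p.2 + p.1)

def curdam (s : List String) : Int := (s.foldl pvDstep (1, 0)).2

-- the 'for i in range(len(s)-1)' scan keeping the LAST i with s[i]=='C' and s[i+1]=='S'
def findPos (s : List String) : Int :=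
  (PySem.List.pyRange 0 ((s.length : Int) - 1) 1).foldl
    (fun pos i => if pvGetS s i = "C" ∧ pvGetS s (i + 1) = "S" then i else pos) (-1)

-- s[pos], s[pos+1] = s[pos+1], s[pos];  pos is a valid non-negative index when A reaches this
def swapCS (s : List String) (pos : Int) : List String :=
  (s.set pos.toNat (pvGetS s (pos + 1))).set (pos.toNat + 1) (pvGetS s pos)

-- the multiset of exponents of all damage reductions still available in s
-- ((Mtok s).card + 1 serves as the loop's fuel below)
def tokI (b c : Int) : Multiset Int := (PySem.List.pyRange b c 1 : List Int)

def MtokAux : Int → Int → List String → Multiset Int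
  | _, _, [] => 0
  | c, b, x :: t =>
    if x = "C" then MtokAux (c+1) b t
    else if x = "S" then tokI b c + MtokAux c b t
    else MtokAux c c t

def Mtok (s : List String) : Multiset Int := MtokAux 0 0 s

-- the 'while True' loop; fuel is only a totality guard ((Mtok s).card bounds the possible swaps,
-- each swap removes one token), the algorithm is A's
def swapLoop (fuel : Nat) (s : List String) (d : Int) (swap_c : Int) : Int :=
  match fuel with
  | 0 => 0
  | fuel + 1 =>
    if curdam s ≤ d then swap_c
    else if findPos s = -1 then -1
    else swapLoop fuel (swapCS s (findPos s)) d (swap_c + 1)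

def swap_required (s : List String) (d : Int) : Int := swapLoop ((Mtok s).card + 1) s d 0

-- ===== PORT B =====
-- state (damage, c, base, exps); 2 ** c is ported as 2 ^ c.toNat (c counts 'C's, so 0 ≤ c)
def stepB (q : Int × Int × Int × List Int) (ch : String) : Int × Int × Int × List Int :=
  if ch = "C" then (q.1, q.2.1 + 1, q.2.2.1, q.2.2.2)
  else if ch = "S" then
    (q.1 + 2 ^ q.2.1.toNat, q.2.1, q.2.2.1, q.2.2.2 ++ PySem.List.pyRange q.2.2.1 q.2.1 1)
  else (q.1 + 2 ^ q.2.1.toNat, q.2.1, q.2.1, q.2.2.2)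

-- the 'for e in exps' loop with its early return, then the final conditional return
def altLoop (d : Int) (damage : Int) (swaps : Int) : List Int → Int
  | [] => if damage ≤ d then swaps else -1
  | e :: t => if damage ≤ d then swaps else altLoop d (damage - 2 ^ e.toNat) (swaps + 1) t

def swap_required_alt (s : List String) (d : Int) : Int :=
  altLoop d (s.foldl stepB (0, 0, 0, ([] : List Int))).1 0
    (PySem.List.sorted (s.foldl stepB (0, 0, 0, ([] : List Int))).2.2.2 (fun x => x) true)

-- ===== PRECONDITION & SPEC =====
def Spec_swap_required (s : List String) (d : Int) (out : Int) : Prop := out = swap_required_alt s d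
instance (s : List String) (d : Int) (out : Int) : Decidable (Spec_swap_required s d out) := by unfold Spec_swap_required; infer_instance

-- ===== CLAIM (what is proved, stated in full; the proofs are below) =====
def Claim_equal_swap_required : Prop := ∀ (s : List String) (d : Int), Dom_swap_required s d → Spec_swap_required s d (swap_required s d)

-- ===== LEMMAS AND PROOFS =====

-- the C-count / segment-base state after a prefix (proof-side view of the folds)
def stC : Int → Int → List String → Int × Int
  | c, b, [] => (c, b)
  | c, b, x :: t => if x = "C" then stC (c+1) b t else if x = "S" then stC c b t else stC c c t


theorem stC_cons_C (c b : Int) (t : List String) : stC c b ("C" :: t) = stC (c+1) b t := by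
  simp [stC]

theorem stC_cons_S (c b : Int) (t : List String) : stC c b ("S" :: t) = stC c b t := by
  simp [stC]

theorem stC_cons_other {x : String} (hC : x ≠ "C") (hS : x ≠ "S") (c b : Int) (t : List String) :
    stC c b (x :: t) = stC c c t := by
  simp [stC, hC, hS]

theorem MtokAux_cons_C (c b : Int) (t : List String) :
    MtokAux c b ("C" :: t) = MtokAux (c+1) b t := by
  simp [MtokAux]

theorem MtokAux_cons_S (c b : Int) (t : List String) :
    MtokAux c b ("S" :: t) = tokI b c + MtokAux c b t := by
  simp [MtokAux]

theorem MtokAux_cons_other {x : String} (hC : x ≠ "C") (hS : x ≠ "S") (c b : Int) (t : List String) :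
    MtokAux c b (x :: t) = MtokAux c c t := by
  simp [MtokAux, hC, hS]

theorem foldl_last_match (P : Int → Prop) [DecidablePred P] (a : Int) :
    ∀ (n : Nat) (init : Int),
      ((PySem.List.pyRange a (a + n) 1).foldl (fun pos i => if P i then i else pos) init = init ∧
        ∀ i, a ≤ i → i < a + n → ¬ P i) ∨
      (∃ r, (PySem.List.pyRange a (a + n) 1).foldl (fun pos i => if P i then i else pos) init = r ∧
        a ≤ r ∧ r < a + n ∧ P r ∧ ∀ i, r < i → i < a + n → ¬ P i) := by
  intro n
  induction n with
  | zero =>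
    intro init; left
    rw [show (a + ((0:Nat) : Int)) = a by omega, PySem.List.pyRange_one_eq_nil (by omega)]
    exact ⟨rfl, by omega⟩
  | succ n ih =>
    intro init
    rw [show (a + ((n+1:Nat) : Int)) = (a + (n:Nat)) + 1 by push_cast; ring,
        PySem.List.pyRange_one_succ_right (by omega), List.foldl_append]
    simp only [List.foldl_cons, List.foldl_nil]
    by_cases hp : P (a + (n:Nat))
    · right
      exact ⟨a + (n:Nat), by simp [hp], by omega, by omega, hp, by intro i h1 h2; omega⟩
    · rcases ih init with ⟨heq, hnone⟩ | ⟨r, heq, h1, h2, hPr, hmax⟩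
      · left
        refine ⟨by simp [hp, heq], ?_⟩
        intro i hi1 hi2
        by_cases hi : i = a + (n:Nat)
        · subst hi; exact hp
        · exact hnone i hi1 (by omega)
      · right
        refine ⟨r, by simp [hp, heq], h1, by omega, hPr, ?_⟩
        intro i hi1 hi2
        by_cases hi : i = a + (n:Nat)
        · subst hi; exact hp
        · exact hmax i hi1 (by omega)

theorem set_append_skip (a : List String) (r : List String) (k : Nat) (v : String) :
    (a ++ r).set (a.length + k) v = a ++ r.set k v := by
  induction a with
  | nil => simp
  | cons x xs ih => simp [Nat.succ_add, ih]

theorem swapCS_eq (a t : List String) :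
    swapCS (a ++ "C" :: "S" :: t) ((a.length : Int)) = a ++ "S" :: "C" :: t := by
  unfold swapCS pvGetS
  have h1 : PySem.List.pyGet? (a ++ "C" :: "S" :: t) ((a.length : Int) + 1) = some "S" := by
    rw [show ((a.length : Int) + 1) = ((a.length + 1 : Nat) : Int) by push_cast; ring,
        PySem.List.pyGet?_natCast]
    rw [List.getElem?_append_right (by omega)]
    simp
  have h2 : PySem.List.pyGet? (a ++ "C" :: "S" :: t) ((a.length : Int)) = some "C" := by
    rw [PySem.List.pyGet?_natCast, List.getElem?_append_right (by omega)]
    simp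
  rw [h1, h2]
  simp only [Option.getD_some, Int.toNat_natCast]
  have e1 : (a ++ "C" :: "S" :: t).set a.length "S" = a ++ "S" :: "S" :: t := by
    have := set_append_skip a ("C" :: "S" :: t) 0 "S"
    simpa using this
  rw [e1]
  have e2 : (a ++ "S" :: "S" :: t).set (a.length + 1) "C" = a ++ "S" :: "C" :: t := by
    have := set_append_skip a ("S" :: "S" :: t) 1 "C"
    simpa using this
  rw [e2]

theorem findPos_spec (s : List String) (h : findPos s ≠ -1) :
    ∃ (a t : List String),
      s = a ++ "C" :: "S" :: t ∧
      findPos s = (a.length : Int) ∧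
      (∀ j : Nat, ¬ (t[j]? = some "C" ∧ t[j+1]? = some "S")) := by
  by_cases hlen : s.length = 0
  · exfalso; apply h
    unfold findPos
    rw [hlen]
    rw [PySem.List.pyRange_one_eq_nil (by omega)]
    rfl
  · have hb : ((s.length : Int) - 1) = 0 + ((s.length - 1 : Nat) : Int) := by omega
    have := foldl_last_match (fun i => pvGetS s i = "C" ∧ pvGetS s (i + 1) = "S") 0
      (s.length - 1) (-1)
    rcases this with ⟨heq, _⟩ | ⟨r, heq, h1, h2, hPr, hmax⟩
    · exfalso; apply h
      unfold findPos
      rw [hb]; exact heq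
    · have hfp : findPos s = r := by unfold findPos; rw [hb]; exact heq
      have hrn : r.toNat + 1 < s.length := by omega
      have hr0 : (0:Int) ≤ r := h1
      have hvC : s[r.toNat] = "C" := by
        have := hPr.1
        unfold pvGetS at this
        rw [PySem.List.pyGet?_of_nonneg _ hr0] at this
        rwa [List.getElem?_eq_getElem (by omega), Option.getD_some] at this
      have hvS : s[r.toNat + 1] = "S" := by
        have := hPr.2
        unfold pvGetS at this
        rw [PySem.List.pyGet?_of_nonneg _ (by omega)] at this
        rw [show (r+1).toNat = r.toNat + 1 by omega] at this
        rwa [List.getElem?_eq_getElem (by omega), Option.getD_some] at this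
      refine ⟨s.take r.toNat, s.drop (r.toNat + 1 + 1), ?_, ?_, ?_⟩
      · conv_lhs => rw [← List.take_append_drop r.toNat s]
        congr 1
        rw [List.drop_eq_getElem_cons (show r.toNat < s.length by omega), hvC]
        congr 1
        rw [List.drop_eq_getElem_cons (show r.toNat + 1 < s.length by omega), hvS]
      · rw [hfp, List.length_take]; omega
      · intro j hj
        obtain ⟨hjC, hjS⟩ := hj
        rw [List.getElem?_drop] at hjC hjS
        have hlt : r.toNat + 1 + 1 + (j+1) < s.length := by
          by_contra hc
          rw [List.getElem?_eq_none (by omega)] at hjS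
          simp at hjS
        apply hmax ((r.toNat + 1 + 1 + j : Nat) : Int) (by omega) (by omega)
        constructor
        · unfold pvGetS
          rw [PySem.List.pyGet?_natCast, hjC]; rfl
        · unfold pvGetS
          rw [show (((r.toNat + 1 + 1 + j : Nat) : Int) + 1) = ((r.toNat + 1 + 1 + (j+1) : Nat) : Int) by push_cast; ring,
              PySem.List.pyGet?_natCast, hjS]
          rfl

theorem stC_bounds : ∀ (t : List String) (c b : Int), 0 ≤ b → b ≤ c →
    0 ≤ (stC c b t).2 ∧ (stC c b t).2 ≤ (stC c b t).1 ∧ c ≤ (stC c b t).1 := by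
  intro t
  induction t with
  | nil => intro c b h1 h2; exact ⟨h1, h2, le_refl c⟩
  | cons x t ih =>
    intro c b h1 h2
    by_cases hC : x = "C"
    · subst hC; rw [stC_cons_C]
      have := ih (c+1) b h1 (by omega)
      exact ⟨this.1, this.2.1, by omega⟩
    · by_cases hS : x = "S"
      · subst hS; rw [stC_cons_S]
        exact ih c b h1 h2
      · rw [stC_cons_other hC hS]
        have := ih c c (by omega) (le_refl c)
        exact ⟨this.1, this.2.1, this.2.2⟩

theorem MtokAux_append : ∀ (x y : List String) (c b : Int),
    MtokAux c b (x ++ y) = MtokAux c b x + MtokAux (stC c b x).1 (stC c b x).2 y := by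
  intro x
  induction x with
  | nil => intro y c b; simp [MtokAux, stC]
  | cons z t ih =>
    intro y c b
    by_cases hC : z = "C"
    · subst hC
      rw [List.cons_append, MtokAux_cons_C, MtokAux_cons_C, stC_cons_C, ih]
    · by_cases hS : z = "S"
      · subst hS
        rw [List.cons_append, MtokAux_cons_S, MtokAux_cons_S, stC_cons_S, ih, add_assoc]
      · rw [List.cons_append, MtokAux_cons_other hC hS, MtokAux_cons_other hC hS,
            stC_cons_other hC hS, ih]

theorem tokI_succ (b c : Int) (h : b ≤ c) : tokI b (c + 1) = c ::ₘ tokI b c := by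
  unfold tokI
  rw [PySem.List.pyRange_one_succ_right h, ← Multiset.coe_add, add_comm,
      show ((([c] : List Int)) : Multiset Int) = ({c} : Multiset Int) from rfl,
      Multiset.singleton_add]

theorem Mtok_swap (a t : List String) :
    Mtok (a ++ "C" :: "S" :: t) = (stC 0 0 a).1 ::ₘ Mtok (a ++ "S" :: "C" :: t) := by
  unfold Mtok
  rw [MtokAux_append, MtokAux_append]
  have hb := stC_bounds a 0 0 (le_refl 0) (le_refl 0)
  have hle : (stC 0 0 a).2 ≤ (stC 0 0 a).1 := hb.2.1
  rw [MtokAux_cons_C, MtokAux_cons_S, MtokAux_cons_S, MtokAux_cons_C,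
      tokI_succ _ _ hle, Multiset.cons_add, Multiset.add_cons]

theorem findPos_none (s : List String) (h : findPos s = -1) :
    ∀ j : Nat, ¬ (s[j]? = some "C" ∧ s[j+1]? = some "S") := by
  intro j hj
  obtain ⟨hjC, hjS⟩ := hj
  have hlt : j + 1 < s.length := by
    by_contra hc
    rw [List.getElem?_eq_none (by omega)] at hjS
    simp at hjS
  by_cases hlen : s.length = 0
  · omega
  · have hb : ((s.length : Int) - 1) = 0 + ((s.length - 1 : Nat) : Int) := by omega
    rcases foldl_last_match (fun i => pvGetS s i = "C" ∧ pvGetS s (i + 1) = "S") 0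
      (s.length - 1) (-1) with ⟨heq, hnone⟩ | ⟨r, heq, h1, h2, hPr, hmax⟩
    · apply hnone ((j : Nat) : Int) (by omega) (by omega)
      constructor
      · unfold pvGetS; rw [PySem.List.pyGet?_natCast, hjC]; rfl
      · unfold pvGetS
        rw [show (((j:Nat) : Int) + 1) = ((j + 1 : Nat) : Int) by push_cast; ring,
            PySem.List.pyGet?_natCast, hjS]
        rfl
    · have hfp : findPos s = r := by unfold findPos; rw [hb]; exact heq
      omega

theorem stC_fst : ∀ (t : List String) (c b : Int),
    (stC c b t).1 = c + (t.count "C" : Int) := by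
  intro t
  induction t with
  | nil => intro c b; simp [stC]
  | cons x t ih =>
    intro c b
    by_cases hC : x = "C"
    · subst hC; rw [stC_cons_C, ih]
      have : ("C" :: t).count "C" = t.count "C" + 1 := by simp
      rw [this]; push_cast; ring
    · have hcnt : (x :: t).count "C" = t.count "C" := by
        simp [hC]
      by_cases hS : x = "S"
      · subst hS; rw [stC_cons_S, ih, hcnt]
      · rw [stC_cons_other hC hS, ih, hcnt]


theorem pvDstep_C (p : Int × Int) : pvDstep p "C" = (p.1 * 2, p.2) := by simp [pvDstep]

theorem pvDstep_other (p : Int × Int) {i : String} (h : i ≠ "C") :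
    pvDstep p i = (p.1, p.2 + p.1) := by simp [pvDstep, h]

theorem pvDstep_S (p : Int × Int) : pvDstep p "S" = (p.1, p.2 + p.1) := by simp [pvDstep]

theorem stepB_C (q : Int × Int × Int × List Int) :
    stepB q "C" = (q.1, q.2.1 + 1, q.2.2.1, q.2.2.2) := by simp [stepB]

theorem stepB_S (q : Int × Int × Int × List Int) :
    stepB q "S" = (q.1 + 2 ^ q.2.1.toNat, q.2.1, q.2.2.1,
      q.2.2.2 ++ PySem.List.pyRange q.2.2.1 q.2.1 1) := by simp [stepB]

theorem stepB_other (q : Int × Int × Int × List Int) {ch : String} (h1 : ch ≠ "C") (h2 : ch ≠ "S") :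
    stepB q ch = (q.1 + 2 ^ q.2.1.toNat, q.2.1, q.2.1, q.2.2.2) := by simp [stepB, h1, h2]

theorem dam_affine : ∀ (t : List String) (ch da : Int),
    (t.foldl pvDstep (ch, da)).2 = da + (t.foldl pvDstep (ch, 0)).2 := by
  intro t
  induction t with
  | nil => intro ch da; simp
  | cons x t ih =>
    intro ch da
    by_cases hC : x = "C"
    · subst hC
      rw [List.foldl_cons, List.foldl_cons, pvDstep_C, pvDstep_C]
      exact ih (ch * 2) da
    · rw [List.foldl_cons, List.foldl_cons, pvDstep_other _ hC, pvDstep_other _ hC]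
      rw [ih ch (da + ch), ih ch (0 + ch)]
      ring

theorem dcharge : ∀ (t : List String) (ch da : Int),
    (t.foldl pvDstep (ch, da)).1 = ch * 2 ^ t.count "C" := by
  intro t
  induction t with
  | nil => intro ch da; simp
  | cons x t ih =>
    intro ch da
    by_cases hC : x = "C"
    · subst hC
      rw [List.foldl_cons, pvDstep_C, ih]
      have : ("C" :: t).count "C" = t.count "C" + 1 := by simp
      rw [this, pow_succ]; ring
    · rw [List.foldl_cons, pvDstep_other _ hC, ih]
      have : (x :: t).count "C" = t.count "C" := by simp [hC]
      rw [this]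

theorem curdam_swap (a t : List String) :
    curdam (a ++ "C" :: "S" :: t) = curdam (a ++ "S" :: "C" :: t) + 2 ^ a.count "C" := by
  unfold curdam
  rw [List.foldl_append, List.foldl_append]
  simp only [List.foldl_cons, pvDstep_C, pvDstep_S]
  rw [dam_affine t ((a.foldl pvDstep (1, 0)).1 * 2)
        ((a.foldl pvDstep (1, 0)).2 + (a.foldl pvDstep (1, 0)).1 * 2),
      dam_affine t ((a.foldl pvDstep (1, 0)).1 * 2)
        ((a.foldl pvDstep (1, 0)).2 + (a.foldl pvDstep (1, 0)).1)]
  simp only [dcharge]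
  ring

theorem MtokAux_noCS : ∀ (t : List String),
    (∀ j : Nat, ¬ (t[j]? = some "C" ∧ t[j+1]? = some "S")) → ∀ (c b : Int),
      ((∀ x, t[0]? = some x → x ≠ "S") → MtokAux c b t = 0) ∧
      (MtokAux c c t = 0) ∧
      (b ≤ c → ∀ y ∈ MtokAux c b t, b ≤ y ∧ y < c) := by
  intro t
  induction t with
  | nil =>
    intro _ c b
    refine ⟨fun _ => rfl, rfl, fun _ y hy => absurd hy ?_⟩
    simp [MtokAux]
  | cons x t ih =>
    intro h c b
    have ht : ∀ j : Nat, ¬ (t[j]? = some "C" ∧ t[j+1]? = some "S") := by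
      intro j hj
      exact h (j+1) (by simpa using hj)
    have iht := ih ht
    by_cases hC : x = "C"
    · subst hC
      have hhead : ∀ z, t[0]? = some z → z ≠ "S" := by
        intro z hz hzS
        subst hzS
        exact h 0 ⟨rfl, by simpa using hz⟩
      refine ⟨fun _ => ?_, ?_, ?_⟩
      · rw [MtokAux_cons_C]; exact (iht (c+1) b).1 hhead
      · rw [MtokAux_cons_C]; exact (iht (c+1) c).1 hhead
      · intro hbc y hy
        rw [MtokAux_cons_C, (iht (c+1) b).1 hhead] at hy
        simp at hy
    · by_cases hS : x = "S"
      · subst hS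
        have htokcc : tokI c c = 0 := by
          unfold tokI
          rw [PySem.List.pyRange_one_eq_nil le_rfl]
          rfl
        refine ⟨fun hx => absurd rfl (hx "S" rfl), ?_, ?_⟩
        · rw [MtokAux_cons_S, htokcc, zero_add]
          exact (iht c c).2.1
        · intro hbc y hy
          rw [MtokAux_cons_S] at hy
          rcases Multiset.mem_add.mp hy with h1 | h2
          · exact PySem.List.mem_pyRange_one.mp (Multiset.mem_coe.mp h1)
          · exact (iht c b).2.2 hbc y h2
      · refine ⟨fun _ => ?_, ?_, fun hbc y hy => ?_⟩
        · rw [MtokAux_cons_other hC hS]; exact (iht c b).2.1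
        · rw [MtokAux_cons_other hC hS]; exact (iht c c).2.1
        · rw [MtokAux_cons_other hC hS, (iht c b).2.1] at hy
          simp at hy

theorem MtokAux_bound : ∀ (t : List String) (c b : Int), b ≤ c →
    ∀ y ∈ MtokAux c b t, y < c + (t.count "C" : Int) := by
  intro t
  induction t with
  | nil => intro c b _ y hy; exact absurd hy (by simp [MtokAux])
  | cons x t ih =>
    intro c b hbc y hy
    by_cases hC : x = "C"
    · subst hC
      rw [MtokAux_cons_C] at hy
      have := ih (c+1) b (by omega) y hy
      have hcnt : ("C" :: t).count "C" = t.count "C" + 1 := by simp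
      rw [hcnt]; push_cast; push_cast at this; omega
    · have hcnt : (x :: t).count "C" = t.count "C" := by simp [hC]
      by_cases hS : x = "S"
      · subst hS
        rw [MtokAux_cons_S] at hy
        rcases Multiset.mem_add.mp hy with h1 | h2
        · have := PySem.List.mem_pyRange_one.mp (Multiset.mem_coe.mp h1)
          have hc : (0:Int) ≤ (t.count "C" : Int) := by positivity
          rw [hcnt]; omega
        · have := ih c b hbc y h2; rw [hcnt]; omega
      · rw [MtokAux_cons_other hC hS] at hy
        have := ih c c le_rfl y hy; rw [hcnt]; omega

theorem Mtok_max (a t : List String)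
    (hno : ∀ j : Nat, ¬ (t[j]? = some "C" ∧ t[j+1]? = some "S")) :
    ∀ y ∈ Mtok (a ++ "C" :: "S" :: t), y ≤ (stC 0 0 a).1 := by
  intro y hy
  unfold Mtok at hy
  rw [MtokAux_append] at hy
  have hb := stC_bounds a 0 0 le_rfl le_rfl
  have hfst := stC_fst a 0 0
  rcases Multiset.mem_add.mp hy with h1 | h2
  · have := MtokAux_bound a 0 0 le_rfl y h1
    omega
  · rw [MtokAux_cons_C, MtokAux_cons_S] at h2
    rcases Multiset.mem_add.mp h2 with h3 | h4
    · have := PySem.List.mem_pyRange_one.mp (Multiset.mem_coe.mp h3)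
      omega
    · have := (MtokAux_noCS t hno ((stC 0 0 a).1 + 1) (stC 0 0 a).2).2.2 (by omega) y h4
      omega

theorem foldB_spec : ∀ (t : List String) (c b da : Int) (ex : List Int), 0 ≤ b → b ≤ c →
    (t.foldl stepB (da, c, b, ex)).1 = da + (t.foldl pvDstep (2 ^ c.toNat, 0)).2 ∧
    ((t.foldl stepB (da, c, b, ex)).2.2.2 : Multiset Int) = (ex : Multiset Int) + MtokAux c b t := by
  intro t
  induction t with
  | nil =>
    intro c b da ex h0 hbc
    constructor
    · simp
    · simp [MtokAux]
  | cons x t ih =>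
    intro c b da ex h0 hbc
    by_cases hC : x = "C"
    · subst hC
      rw [List.foldl_cons, List.foldl_cons, stepB_C, pvDstep_C]
      have h1 : (2:Int) ^ c.toNat * 2 = 2 ^ (c+1).toNat := by
        rw [show (c+1).toNat = c.toNat + 1 by omega, pow_succ]
      obtain ⟨g1, g2⟩ := ih (c+1) b da ex h0 (by omega)
      constructor
      · simp only at g1 ⊢
        rw [h1]
        exact g1
      · simp only at g2 ⊢
        rw [g2, MtokAux_cons_C]
    · have hd : pvDstep ((2:Int) ^ c.toNat, (0:Int)) x = (2 ^ c.toNat, 0 + 2 ^ c.toNat) :=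
        pvDstep_other _ hC
      by_cases hS : x = "S"
      · subst hS
        rw [List.foldl_cons, List.foldl_cons, stepB_S, hd]
        obtain ⟨g1, g2⟩ := ih c b (da + 2 ^ c.toNat) (ex ++ PySem.List.pyRange b c 1) h0 hbc
        constructor
        · simp only at g1 ⊢
          rw [g1, dam_affine t _ (0 + 2 ^ c.toNat)]
          ring
        · simp only at g2 ⊢
          rw [g2, MtokAux_cons_S, ← Multiset.coe_add]
          rw [show tokI b c = ((PySem.List.pyRange b c 1 : List Int) : Multiset Int) from rfl]
          rw [add_assoc]
      · rw [List.foldl_cons, List.foldl_cons, stepB_other _ hC hS, hd]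
        obtain ⟨g1, g2⟩ := ih c c (da + 2 ^ c.toNat) ex (by omega) le_rfl
        constructor
        · simp only at g1 ⊢
          rw [g1, dam_affine t _ (0 + 2 ^ c.toNat)]
          ring
        · simp only at g2 ⊢
          rw [g2, MtokAux_cons_other hC hS]

theorem altLoop_of_le (d damage k : Int) (L : List Int) (h : damage ≤ d) :
    altLoop d damage k L = k := by
  cases L <;> simp [altLoop, h]

theorem main_equiv (fuel : Nat) : ∀ (s : List String) (d k : Int) (L : List Int),
    (Mtok s).card < fuel → L.Pairwise (fun a b => b ≤ a) → (L : Multiset Int) = Mtok s →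
    swapLoop fuel s d k = altLoop d (curdam s) k L := by
  induction fuel with
  | zero => intro s d k L h; exact absurd h (Nat.not_lt_zero _)
  | succ fuel ih =>
    intro s d k L hcard hpw hL
    simp only [swapLoop]
    by_cases hd : curdam s ≤ d
    · rw [if_pos hd, altLoop_of_le _ _ _ _ hd]
    · rw [if_neg hd]
      by_cases hp : findPos s = -1
      · rw [if_pos hp]
        have hno := findPos_none s hp
        have hM : Mtok s = 0 := by
          by_contra hne
          obtain ⟨y, hy⟩ := Multiset.exists_mem_of_ne_zero hne
          have := (MtokAux_noCS s hno 0 0).2.2 le_rfl y hy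
          omega
        cases L with
        | nil => simp [altLoop, hd]
        | cons e L' =>
          exfalso
          rw [hM] at hL
          simp at hL
      · rw [if_neg hp]
        obtain ⟨a, t, hs, hpos, hno⟩ := findPos_spec s hp
        subst hs
        rw [hpos, swapCS_eq]
        have hswap := Mtok_swap a t
        have hmax := Mtok_max a t hno
        have hLne : L ≠ [] := by
          intro h0
          rw [h0, hswap] at hL
          simp at hL
        obtain ⟨e, L', rfl⟩ := List.exists_cons_of_ne_nil hLne
        have heL : e ≤ (stC 0 0 a).1 := by
          apply hmax
          rw [← hL]
          exact Multiset.mem_coe.mpr (List.mem_cons_self)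
        have hc0L : (stC 0 0 a).1 ∈ ((e :: L' : List Int) : Multiset Int) := by
          rw [hL, hswap]
          exact Multiset.mem_cons_self _ _
        have hce : (stC 0 0 a).1 ≤ e := by
          rcases List.mem_cons.mp (Multiset.mem_coe.mp hc0L) with h1 | h2
          · omega
          · exact (List.pairwise_cons.mp hpw).1 _ h2
        have he : e = (stC 0 0 a).1 := le_antisymm heL hce
        have hstep : altLoop d (curdam (a ++ "C" :: "S" :: t)) k (e :: L') =
            altLoop d (curdam (a ++ "C" :: "S" :: t) - 2 ^ e.toNat) (k + 1) L' := by
          simp [altLoop, hd]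
        rw [hstep]
        have hfst := stC_fst a 0 0
        have h2e : (2:Int) ^ e.toNat = 2 ^ a.count "C" := by
          have : e.toNat = a.count "C" := by omega
          rw [this]
        have hcd := curdam_swap a t
        have hdam : curdam (a ++ "C" :: "S" :: t) - 2 ^ e.toNat =
            curdam (a ++ "S" :: "C" :: t) := by
          rw [h2e]; omega
        rw [hdam]
        have hcard' : (Mtok (a ++ "S" :: "C" :: t)).card < fuel := by
          rw [hswap, Multiset.card_cons] at hcard
          omega
        have hL' : ((L' : List Int) : Multiset Int) = Mtok (a ++ "S" :: "C" :: t) := by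
          rw [← Multiset.cons_coe, he, hswap] at hL
          exact (Multiset.cons_inj_right _).mp hL
        exact ih (a ++ "S" :: "C" :: t) d (k+1) L' hcard'
          (List.pairwise_cons.mp hpw).2 hL'

-- ===== VERDICT (by name: the statement is the Claim_ definition above) =====
theorem swap_required_spec : Claim_equal_swap_required := by
  intro s d _
  unfold Spec_swap_required swap_required swap_required_alt
  have hfold := foldB_spec s 0 0 0 [] (le_refl 0) (le_refl 0)
  have hdam : (s.foldl stepB (0, 0, 0, ([] : List Int))).1 = curdam s := by
    rw [hfold.1]
    norm_num [curdam]
  have hms : ((PySem.List.sorted (s.foldl stepB (0, 0, 0, ([] : List Int))).2.2.2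
      (fun x => x) true : List Int) : Multiset Int) = Mtok s := by
    rw [Multiset.coe_eq_coe.mpr (PySem.List.sorted_perm _ _ _), hfold.2]
    simp [Mtok]
  have hpw := PySem.List.sorted_pairwise_rev (s.foldl stepB (0, 0, 0, ([] : List Int))).2.2.2
    (fun x => x)
  rw [hdam]
  exact main_equiv ((Mtok s).card + 1) s d 0 _ (Nat.lt_succ_self _) hpw hms
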